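-- pv_equiv track=rewrite | github.com/anshtxc/Helix-AI-Assistant | Helix/brain.py | force_respect
-- ===== SOURCE A (Python) =====
-- def force_respect(text):
--     replacements = {
--         "tum": "aap",
--         "Tum": "Aap",
--         "tera": "aapka",
--         "tere": "aapke",
--         "tujhe": "aapko"
--     }
--     for old, new in replacements.items():
--         text = text.replace(old, new)
--     return text
-- ===== SOURCE B (Python) =====
-- import re
--
-- _REPLACEMENTS = {
--     "tum": "aap",
--     "Tum": "Aap",
--     "tera": "aapka",
--     "tere": "aapke",
--     "tujhe": "aapko"
-- }
--
-- _PATTERN = re.compile("|".join(re.escape(k) for k in _REPLACEMENTS))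
--
--
-- def force_respect(text):
--     return _PATTERN.sub(lambda m: _REPLACEMENTS[m.group()], text)
-- ===== Notes on version B (the rewrite author's own statement) =====
-- stated objective: idiomatic
-- what changed: Five sequential full-text str.replace passes are replaced by one compiled regex (tum|Tum|tera|tere|tujhe) and a single left-to-right re.sub pass with a dict lookup as the replacer.
-- intended difference: On texts containing the substring 'tertum', A returns a value in which a later pass has replaced text freshly created by an earlier pass (A re-processes its own output there), while B's single left-to-right pass replaces only the pronoun occurrences actually present in the input, which is the intended behaviour; A and B are proved to differ on every such text. — e.g. on force_respect("tertum"): A returns "aapkaap", B returns "teraap"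
import Mathlib
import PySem

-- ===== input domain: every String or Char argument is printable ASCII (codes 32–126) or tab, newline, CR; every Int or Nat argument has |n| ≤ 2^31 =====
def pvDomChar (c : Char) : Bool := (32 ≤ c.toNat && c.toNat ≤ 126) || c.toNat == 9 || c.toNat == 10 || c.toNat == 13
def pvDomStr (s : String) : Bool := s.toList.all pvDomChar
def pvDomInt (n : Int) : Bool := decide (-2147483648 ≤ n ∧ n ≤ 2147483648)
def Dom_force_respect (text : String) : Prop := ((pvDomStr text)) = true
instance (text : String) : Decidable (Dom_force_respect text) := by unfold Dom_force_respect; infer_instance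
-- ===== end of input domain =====

-- B replaces A's five sequential full-text str.replace passes by one left-to-right scan
-- (a compiled alternation regex with a dict lookup as replacer); same return value except on
-- texts containing "tertum", where A re-processes its own output (see D_ below).

-- ===== PORT A =====
-- A: five sequential str.replace passes, in dict insertion order (the loop unrolled).
def force_respect (text : String) : String :=
  PySem.Str.replace
    (PySem.Str.replace
      (PySem.Str.replace
        (PySem.Str.replace
          (PySem.Str.replace text "tum" "aap")
          "Tum" "Aap")
        "tera" "aapka")
      "tere" "aapke")
    "tujhe" "aapko"

-- ===== PORT B =====
-- B: the replacement table, in dict insertion order (= the regex alternation order).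
def pvTable : List (List Char × List Char) :=
  [("tum".toList, "aap".toList), ("Tum".toList, "Aap".toList),
   ("tera".toList, "aapka".toList), ("tere".toList, "aapke".toList),
   ("tujhe".toList, "aapko".toList)]

-- B: one left-to-right pass of re.sub with pattern tum|Tum|tera|tere|tujhe: at each position the
-- first alternative that matches is replaced (find? = the regex alternation), else the character
-- is copied unchanged.
def scanT (table : List (List Char × List Char)) : List Char → List Char
  | [] => []
  | c :: t =>
    match table.find? (fun kv => kv.1.isPrefixOf (c :: t)) with
    | some kv => kv.2 ++ scanT table (t.drop (kv.1.length - 1))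
    | none => c :: scanT table t
termination_by l => l.length
decreasing_by
  · simp
  · simp

def force_respect_alt (text : String) : String := String.ofList (scanT pvTable text.toList)

-- ===== PRECONDITION & SPEC =====
-- On texts containing the substring "tertum", A returns a value in which a later pass has
-- replaced text freshly created by an earlier pass (A re-processes its own output there), while
-- B's single left-to-right pass replaces only the pronoun occurrences actually present in the
-- input, which is the intended behaviour; A and B are proved to differ on every such text.
def D_force_respect (text : String) : Prop := PySem.Str.isIn "tertum" text = true
instance (text : String) : Decidable (D_force_respect text) := by unfold D_force_respect; infer_instance

def Spec_force_respect (text : String) (out : String) : Prop :=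
  ¬ D_force_respect text → out = force_respect_alt text
instance (text : String) (out : String) : Decidable (Spec_force_respect text out) := by
  unfold Spec_force_respect; infer_instance

def pvDiffWitness_force_respect : String := "tertum"
def pvDiffWitnessOut_force_respect : String × String := ("aapkaap", "teraap")

-- ===== CLAIM (what is proved, stated in full; the proofs are below) =====
def Claim_unchanged_force_respect : Prop :=
  ∀ (text : String), Dom_force_respect text → Spec_force_respect text (force_respect text)
def Claim_changed_force_respect : Prop :=
  Dom_force_respect (pvDiffWitness_force_respect) ∧ D_force_respect (pvDiffWitness_force_respect) ∧
  force_respect (pvDiffWitness_force_respect) = pvDiffWitnessOut_force_respect.1 ∧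
  force_respect_alt (pvDiffWitness_force_respect) = pvDiffWitnessOut_force_respect.2 ∧
  pvDiffWitnessOut_force_respect.1 ≠ pvDiffWitnessOut_force_respect.2
def Claim_exact_force_respect : Prop :=
  ∀ (text : String), Dom_force_respect text → D_force_respect text →
    force_respect text ≠ force_respect_alt text

-- ===== LEMMAS AND PROOFS =====

-- Python str.replace as a plain left-to-right recursion (no accumulator, no fuel).
def rep (old new : List Char) : List Char → List Char
  | [] => []
  | c :: t =>
    if old.isPrefixOf (c :: t) ∧ old ≠ [] then new ++ rep old new (t.drop (old.length - 1))
    else c :: rep old new t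
termination_by l => l.length
decreasing_by
  · simp
  · simp

theorem go_spec (old new : List Char) (h : old ≠ []) :
    ∀ (fuel : Nat) (l acc : List Char), l.length ≤ fuel →
      PySem.Chars.replace.go old new fuel l acc = acc.reverse ++ rep old new l := by
  intro fuel
  induction fuel with
  | zero =>
    intro l acc hl
    have : l = [] := List.eq_nil_of_length_eq_zero (Nat.le_zero.mp hl)
    subst this
    simp [PySem.Chars.replace.go, rep]
  | succ n ih =>
    intro l acc hl
    match l with
    | [] => simp [PySem.Chars.replace.go, rep]
    | c :: t =>
      by_cases hp : old.isPrefixOf (c :: t)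
      · rw [PySem.Chars.replace.go]
        simp only [hp, if_true]
        rw [ih]
        · rw [rep]
          simp [hp, h]
          match old, h with
          | o :: os, _ => simp [List.drop_succ_cons]
        · have hol : 0 < old.length := List.length_pos_of_ne_nil h
          simp at hl ⊢
          omega
      · rw [PySem.Chars.replace.go]
        simp only [hp, if_false, Bool.false_eq_true]
        rw [ih t (c :: acc) (by simpa using Nat.le_of_succ_le_succ hl), rep]
        simp [hp]

theorem replace_eq_rep (s old new : List Char) (h : old ≠ []) :
    PySem.Chars.replace s old new = rep old new s := by
  rw [PySem.Chars.replace]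
  simp [List.isEmpty_iff, h]
  exact go_spec old new h s.length s [] le_rfl

theorem rep_cons_mismatch (old new : List Char) (c : Char) (x : List Char)
    (h : old.isPrefixOf (c :: x) = false) : rep old new (c :: x) = c :: rep old new x := by
  rw [rep]; simp [h]

theorem head?_shape {α : Type} (l : List α) (a : α) (h : l.head? = some a) :
    ∃ l', l = a :: l' := by
  cases l <;> simp_all

-- Truncated tables (the scan after 1, 2, 3, 4 keys of the dict).
def pvT1 : List (List Char × List Char) := [("tum".toList, "aap".toList)]
def pvT2 : List (List Char × List Char) :=
  [("tum".toList, "aap".toList), ("Tum".toList, "Aap".toList)]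
def pvT3 : List (List Char × List Char) :=
  [("tum".toList, "aap".toList), ("Tum".toList, "Aap".toList),
   ("tera".toList, "aapka".toList)]
def pvT4 : List (List Char × List Char) :=
  [("tum".toList, "aap".toList), ("Tum".toList, "Aap".toList),
   ("tera".toList, "aapka".toList), ("tere".toList, "aapke".toList)]

-- If the scan's output starts with a character no replacement value starts with,
-- that character was copied from the input.
theorem scanT_head_src (table : List (List Char × List Char))
    (hv : ∀ kv ∈ table, kv.2.head? = some 'a' ∨ kv.2.head? = some 'A')
    (t : List Char) (c : Char) (x : List Char)
    (hc1 : c ≠ 'a') (hc2 : c ≠ 'A')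
    (h : scanT table t = c :: x) :
    ∃ t', t = c :: t' ∧ scanT table t' = x := by
  match t with
  | [] => simp [scanT] at h
  | c0 :: t0 =>
    rw [scanT] at h
    rcases hf : table.find? (fun kv => kv.1.isPrefixOf (c0 :: t0)) with _ | kv
    · rw [hf] at h
      simp at h
      exact ⟨t0, by rw [h.1], h.2⟩
    · rw [hf] at h
      exfalso
      have hmem := List.mem_of_find?_eq_some hf
      have h' : kv.2 ++ scanT table (t0.drop (kv.1.length - 1)) = c :: x := h
      rcases hv kv hmem with hA | hA <;>
      · obtain ⟨vs, hvs⟩ := head?_shape _ _ hA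
        rw [hvs] at h'
        simp at h'
        first
        | exact hc1 h'.1.symm
        | exact hc2 h'.1.symm

theorem hv1 : ∀ kv ∈ pvT1, kv.2.head? = some 'a' ∨ kv.2.head? = some 'A' := by decide
theorem hv2 : ∀ kv ∈ pvT2, kv.2.head? = some 'a' ∨ kv.2.head? = some 'A' := by decide
theorem hv3 : ∀ kv ∈ pvT3, kv.2.head? = some 'a' ∨ kv.2.head? = some 'A' := by decide
theorem hv4 : ∀ kv ∈ pvT4, kv.2.head? = some 'a' ∨ kv.2.head? = some 'A' := by decide

theorem reflect2 (t : List Char) (h : (['u','m'] : List Char).isPrefixOf (scanT pvT1 t) = true) :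
    (['u','m'] : List Char).isPrefixOf t = true := by
  obtain ⟨r, hr⟩ := List.isPrefixOf_iff_prefix.mp h
  obtain ⟨t1, ht1, h1⟩ :=
    scanT_head_src pvT1 hv1 t 'u' ('m' :: r) (by decide) (by decide) hr.symm
  obtain ⟨t2, ht2, h2⟩ :=
    scanT_head_src pvT1 hv1 t1 'm' r (by decide) (by decide) h1
  subst ht1; subst ht2
  simp [List.isPrefixOf]

theorem reflect4 (t : List Char) (h : (['e','r','e'] : List Char).isPrefixOf (scanT pvT3 t) = true) :
    (['e','r','e'] : List Char).isPrefixOf t = true := by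
  obtain ⟨r, hr⟩ := List.isPrefixOf_iff_prefix.mp h
  obtain ⟨t1, ht1, h1⟩ :=
    scanT_head_src pvT3 hv3 t 'e' ('r' :: 'e' :: r) (by decide) (by decide) hr.symm
  obtain ⟨t2, ht2, h2⟩ :=
    scanT_head_src pvT3 hv3 t1 'r' ('e' :: r) (by decide) (by decide) h1
  obtain ⟨t3, ht3, h3⟩ :=
    scanT_head_src pvT3 hv3 t2 'e' r (by decide) (by decide) h2
  subst ht1; subst ht2; subst ht3
  simp [List.isPrefixOf]

theorem reflect5 (t : List Char)
    (h : (['u','j','h','e'] : List Char).isPrefixOf (scanT pvT4 t) = true) :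
    (['u','j','h','e'] : List Char).isPrefixOf t = true := by
  obtain ⟨r, hr⟩ := List.isPrefixOf_iff_prefix.mp h
  obtain ⟨t1, ht1, h1⟩ :=
    scanT_head_src pvT4 hv4 t 'u' ('j' :: 'h' :: 'e' :: r) (by decide) (by decide) hr.symm
  obtain ⟨t2, ht2, h2⟩ :=
    scanT_head_src pvT4 hv4 t1 'j' ('h' :: 'e' :: r) (by decide) (by decide) h1
  obtain ⟨t3, ht3, h3⟩ :=
    scanT_head_src pvT4 hv4 t2 'h' ('e' :: r) (by decide) (by decide) h2
  obtain ⟨t4, ht4, h4⟩ :=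
    scanT_head_src pvT4 hv4 t3 'e' r (by decide) (by decide) h3
  subst ht1; subst ht2; subst ht3; subst ht4
  simp [List.isPrefixOf]

theorem reflect3 (t : List Char)
    (h : (['e','r','a'] : List Char).isPrefixOf (scanT pvT2 t) = true) :
    (['e','r','a'] : List Char).isPrefixOf t = true ∨
      (['e','r','t','u','m'] : List Char).isPrefixOf t = true := by
  obtain ⟨r, hr⟩ := List.isPrefixOf_iff_prefix.mp h
  obtain ⟨t1, ht1, h1⟩ :=
    scanT_head_src pvT2 hv2 t 'e' ('r' :: 'a' :: r) (by decide) (by decide) hr.symm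
  obtain ⟨t2, ht2, h2⟩ :=
    scanT_head_src pvT2 hv2 t1 'r' ('a' :: r) (by decide) (by decide) h1
  subst ht1; subst ht2
  match t2, h2 with
  | [], h2 => simp [scanT] at h2
  | c0 :: t3, h2 =>
    by_cases ha : (['t','u','m'] : List Char).isPrefixOf (c0 :: t3) = true
    · right
      obtain ⟨r2, hr2⟩ := List.isPrefixOf_iff_prefix.mp ha
      rw [← hr2]
      simp [List.isPrefixOf]
    · by_cases hb : (['T','u','m'] : List Char).isPrefixOf (c0 :: t3) = true
      · exfalso
        obtain ⟨r2, hr2⟩ := List.isPrefixOf_iff_prefix.mp hb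
        rw [← hr2] at h2
        simp only [List.cons_append, List.nil_append] at h2
        rw [scanT] at h2
        simp [pvT2, List.find?, List.isPrefixOf] at h2
      · have hs : scanT pvT2 (c0 :: t3) = c0 :: scanT pvT2 t3 := by
          rw [scanT]; simp [pvT2, List.find?, ha, hb]
        rw [hs] at h2
        simp at h2
        left
        rw [h2.1]
        simp [List.isPrefixOf]

theorem step1aux : ∀ (n : Nat) (cs : List Char), cs.length ≤ n →
    rep ['t','u','m'] ['a','a','p'] cs = scanT pvT1 cs := by
  intro n
  induction n with
  | zero =>
    intro cs hl
    have : cs = [] := List.eq_nil_of_length_eq_zero (Nat.le_zero.mp hl)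
    subst this
    simp [scanT, rep]
  | succ n ih =>
    intro cs hl
    by_cases h1 : (['t','u','m'] : List Char).isPrefixOf cs = true
    · obtain ⟨r, hr⟩ := List.isPrefixOf_iff_prefix.mp h1
      subst hr
      simp only [List.cons_append, List.nil_append] at hl ⊢
      simp [scanT, rep, pvT1, List.find?, List.isPrefixOf]
      exact ih r (by simp at hl; omega)
    · rcases cs with _ | ⟨c, t⟩
      · simp [scanT, rep]
      · have hsB : scanT pvT1 (c :: t) = c :: scanT pvT1 t := by
          rw [scanT]; simp [pvT1, List.find?, h1]
        have h1' : (['t','u','m'] : List Char).isPrefixOf (c :: t) = false :=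
          Bool.eq_false_iff.mpr h1
        rw [hsB, rep_cons_mismatch _ _ _ _ h1']
        exact congrArg (c :: ·) (ih t (by simp at hl; omega))

theorem step2aux : ∀ (n : Nat) (cs : List Char), cs.length ≤ n →
    rep ['T','u','m'] ['A','a','p'] (scanT pvT1 cs) = scanT pvT2 cs := by
  intro n
  induction n with
  | zero =>
    intro cs hl
    have : cs = [] := List.eq_nil_of_length_eq_zero (Nat.le_zero.mp hl)
    subst this
    simp [scanT, rep]
  | succ n ih =>
    intro cs hl
    by_cases h1 : (['t','u','m'] : List Char).isPrefixOf cs = true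
    · obtain ⟨r, hr⟩ := List.isPrefixOf_iff_prefix.mp h1
      subst hr
      simp only [List.cons_append, List.nil_append] at hl ⊢
      simp [scanT, rep, pvT1, pvT2, List.find?, List.isPrefixOf]
      exact ih r (by simp at hl; omega)
    · by_cases h2 : (['T','u','m'] : List Char).isPrefixOf cs = true
      · obtain ⟨r, hr⟩ := List.isPrefixOf_iff_prefix.mp h2
        subst hr
        simp only [List.cons_append, List.nil_append] at hl ⊢
        simp [scanT, rep, pvT1, pvT2, List.find?, List.isPrefixOf]
        exact ih r (by simp at hl; omega)
      · rcases cs with _ | ⟨c, t⟩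
        · simp [scanT, rep]
        · have hsA : scanT pvT1 (c :: t) = c :: scanT pvT1 t := by
            rw [scanT]; simp [pvT1, List.find?, h1]
          have hsB : scanT pvT2 (c :: t) = c :: scanT pvT2 t := by
            rw [scanT]; simp [pvT2, List.find?, h1, h2]
          rw [hsA, hsB]
          by_cases hk : (['T','u','m'] : List Char).isPrefixOf (c :: scanT pvT1 t) = true
          · exfalso
            simp [List.isPrefixOf] at hk
            obtain ⟨hc, hk2⟩ := hk
            have := reflect2 t (by simpa [List.isPrefixOf_iff_prefix] using hk2)
            apply h2
            subst hc
            simp [List.isPrefixOf]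
            exact List.isPrefixOf_iff_prefix.mp this
          · rw [rep_cons_mismatch _ _ _ _ (Bool.eq_false_iff.mpr hk)]
            exact congrArg (c :: ·) (ih t (by simp at hl; omega))

theorem step3aux : ∀ (n : Nat) (cs : List Char), cs.length ≤ n →
    ¬ (['t','e','r','t','u','m'] : List Char) <:+: cs →
    rep ['t','e','r','a'] ['a','a','p','k','a'] (scanT pvT2 cs) = scanT pvT3 cs := by
  intro n
  induction n with
  | zero =>
    intro cs hl _
    have : cs = [] := List.eq_nil_of_length_eq_zero (Nat.le_zero.mp hl)
    subst this
    simp [scanT, rep]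
  | succ n ih =>
    intro cs hl hinf
    by_cases h1 : (['t','u','m'] : List Char).isPrefixOf cs = true
    · obtain ⟨r, hr⟩ := List.isPrefixOf_iff_prefix.mp h1
      subst hr
      have hinf' : ¬ (['t','e','r','t','u','m'] : List Char) <:+: r :=
        fun hx => hinf (hx.trans (List.suffix_append _ r).isInfix)
      simp only [List.cons_append, List.nil_append] at hl ⊢
      simp [scanT, rep, pvT2, pvT3, List.find?, List.isPrefixOf]
      exact ih r (by simp at hl; omega) hinf'
    · by_cases h2 : (['T','u','m'] : List Char).isPrefixOf cs = true
      · obtain ⟨r, hr⟩ := List.isPrefixOf_iff_prefix.mp h2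
        subst hr
        have hinf' : ¬ (['t','e','r','t','u','m'] : List Char) <:+: r :=
          fun hx => hinf (hx.trans (List.suffix_append _ r).isInfix)
        simp only [List.cons_append, List.nil_append] at hl ⊢
        simp [scanT, rep, pvT2, pvT3, List.find?, List.isPrefixOf]
        exact ih r (by simp at hl; omega) hinf'
      · by_cases h3 : (['t','e','r','a'] : List Char).isPrefixOf cs = true
        · obtain ⟨r, hr⟩ := List.isPrefixOf_iff_prefix.mp h3
          subst hr
          have hinf' : ¬ (['t','e','r','t','u','m'] : List Char) <:+: r :=
            fun hx => hinf (hx.trans (List.suffix_append _ r).isInfix)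
          simp only [List.cons_append, List.nil_append] at hl ⊢
          simp [scanT, rep, pvT2, pvT3, List.find?, List.isPrefixOf]
          exact ih r (by simp at hl; omega) hinf'
        · rcases cs with _ | ⟨c, t⟩
          · simp [scanT, rep]
          · have hinf' : ¬ (['t','e','r','t','u','m'] : List Char) <:+: t :=
              fun hx => hinf (hx.trans (List.suffix_cons c t).isInfix)
            have hsA : scanT pvT2 (c :: t) = c :: scanT pvT2 t := by
              rw [scanT]; simp [pvT2, List.find?, h1, h2]
            have hsB : scanT pvT3 (c :: t) = c :: scanT pvT3 t := by
              rw [scanT]; simp [pvT3, List.find?, h1, h2, h3]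
            rw [hsA, hsB]
            by_cases hk : (['t','e','r','a'] : List Char).isPrefixOf (c :: scanT pvT2 t) = true
            · exfalso
              simp [List.isPrefixOf] at hk
              obtain ⟨hc, hk2⟩ := hk
              rcases reflect3 t (by simpa [List.isPrefixOf_iff_prefix] using hk2) with hera | hertum
              · apply h3
                subst hc
                simp [List.isPrefixOf]
                exact List.isPrefixOf_iff_prefix.mp hera
              · apply hinf
                obtain ⟨r2, hr2⟩ := List.isPrefixOf_iff_prefix.mp hertum
                subst hc
                exact ⟨[], r2, by rw [← hr2]; simp⟩
            · rw [rep_cons_mismatch _ _ _ _ (Bool.eq_false_iff.mpr hk)]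
              exact congrArg (c :: ·) (ih t (by simp at hl; omega) hinf')

theorem step4aux : ∀ (n : Nat) (cs : List Char), cs.length ≤ n →
    rep ['t','e','r','e'] ['a','a','p','k','e'] (scanT pvT3 cs) = scanT pvT4 cs := by
  intro n
  induction n with
  | zero =>
    intro cs hl
    have : cs = [] := List.eq_nil_of_length_eq_zero (Nat.le_zero.mp hl)
    subst this
    simp [scanT, rep]
  | succ n ih =>
    intro cs hl
    by_cases h1 : (['t','u','m'] : List Char).isPrefixOf cs = true
    · obtain ⟨r, hr⟩ := List.isPrefixOf_iff_prefix.mp h1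
      subst hr
      simp only [List.cons_append, List.nil_append] at hl ⊢
      simp [scanT, rep, pvT3, pvT4, List.find?, List.isPrefixOf]
      exact ih r (by simp at hl; omega)
    · by_cases h2 : (['T','u','m'] : List Char).isPrefixOf cs = true
      · obtain ⟨r, hr⟩ := List.isPrefixOf_iff_prefix.mp h2
        subst hr
        simp only [List.cons_append, List.nil_append] at hl ⊢
        simp [scanT, rep, pvT3, pvT4, List.find?, List.isPrefixOf]
        exact ih r (by simp at hl; omega)
      · by_cases h3 : (['t','e','r','a'] : List Char).isPrefixOf cs = true
        · obtain ⟨r, hr⟩ := List.isPrefixOf_iff_prefix.mp h3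
          subst hr
          simp only [List.cons_append, List.nil_append] at hl ⊢
          simp [scanT, rep, pvT3, pvT4, List.find?, List.isPrefixOf]
          exact ih r (by simp at hl; omega)
        · by_cases h4 : (['t','e','r','e'] : List Char).isPrefixOf cs = true
          · obtain ⟨r, hr⟩ := List.isPrefixOf_iff_prefix.mp h4
            subst hr
            simp only [List.cons_append, List.nil_append] at hl ⊢
            simp [scanT, rep, pvT3, pvT4, List.find?, List.isPrefixOf]
            exact ih r (by simp at hl; omega)
          · rcases cs with _ | ⟨c, t⟩
            · simp [scanT, rep]
            · have hsA : scanT pvT3 (c :: t) = c :: scanT pvT3 t := by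
                rw [scanT]; simp [pvT3, List.find?, h1, h2, h3]
              have hsB : scanT pvT4 (c :: t) = c :: scanT pvT4 t := by
                rw [scanT]; simp [pvT4, List.find?, h1, h2, h3, h4]
              rw [hsA, hsB]
              by_cases hk : (['t','e','r','e'] : List Char).isPrefixOf (c :: scanT pvT3 t) = true
              · exfalso
                simp [List.isPrefixOf] at hk
                obtain ⟨hc, hk2⟩ := hk
                have := reflect4 t (by simpa [List.isPrefixOf_iff_prefix] using hk2)
                apply h4
                subst hc
                simp [List.isPrefixOf]
                exact List.isPrefixOf_iff_prefix.mp this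
              · rw [rep_cons_mismatch _ _ _ _ (Bool.eq_false_iff.mpr hk)]
                exact congrArg (c :: ·) (ih t (by simp at hl; omega))

theorem step5aux : ∀ (n : Nat) (cs : List Char), cs.length ≤ n →
    rep ['t','u','j','h','e'] ['a','a','p','k','o'] (scanT pvT4 cs) = scanT pvTable cs := by
  intro n
  induction n with
  | zero =>
    intro cs hl
    have : cs = [] := List.eq_nil_of_length_eq_zero (Nat.le_zero.mp hl)
    subst this
    simp [scanT, rep]
  | succ n ih =>
    intro cs hl
    by_cases h1 : (['t','u','m'] : List Char).isPrefixOf cs = true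
    · obtain ⟨r, hr⟩ := List.isPrefixOf_iff_prefix.mp h1
      subst hr
      simp only [List.cons_append, List.nil_append] at hl ⊢
      simp [scanT, rep, pvT4, pvTable, List.find?, List.isPrefixOf]
      exact ih r (by simp at hl; omega)
    · by_cases h2 : (['T','u','m'] : List Char).isPrefixOf cs = true
      · obtain ⟨r, hr⟩ := List.isPrefixOf_iff_prefix.mp h2
        subst hr
        simp only [List.cons_append, List.nil_append] at hl ⊢
        simp [scanT, rep, pvT4, pvTable, List.find?, List.isPrefixOf]
        exact ih r (by simp at hl; omega)
      · by_cases h3 : (['t','e','r','a'] : List Char).isPrefixOf cs = true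
        · obtain ⟨r, hr⟩ := List.isPrefixOf_iff_prefix.mp h3
          subst hr
          simp only [List.cons_append, List.nil_append] at hl ⊢
          simp [scanT, rep, pvT4, pvTable, List.find?, List.isPrefixOf]
          exact ih r (by simp at hl; omega)
        · by_cases h4 : (['t','e','r','e'] : List Char).isPrefixOf cs = true
          · obtain ⟨r, hr⟩ := List.isPrefixOf_iff_prefix.mp h4
            subst hr
            simp only [List.cons_append, List.nil_append] at hl ⊢
            simp [scanT, rep, pvT4, pvTable, List.find?, List.isPrefixOf]
            exact ih r (by simp at hl; omega)
          · by_cases h5 : (['t','u','j','h','e'] : List Char).isPrefixOf cs = true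
            · obtain ⟨r, hr⟩ := List.isPrefixOf_iff_prefix.mp h5
              subst hr
              simp only [List.cons_append, List.nil_append] at hl ⊢
              simp [scanT, rep, pvT4, pvTable, List.find?, List.isPrefixOf]
              exact ih r (by simp at hl; omega)
            · rcases cs with _ | ⟨c, t⟩
              · simp [scanT, rep]
              · have hsA : scanT pvT4 (c :: t) = c :: scanT pvT4 t := by
                  rw [scanT]; simp [pvT4, List.find?, h1, h2, h3, h4]
                have hsB : scanT pvTable (c :: t) = c :: scanT pvTable t := by
                  rw [scanT]; simp [pvTable, List.find?, h1, h2, h3, h4, h5]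
                rw [hsA, hsB]
                by_cases hk : (['t','u','j','h','e'] : List Char).isPrefixOf (c :: scanT pvT4 t) = true
                · exfalso
                  simp [List.isPrefixOf] at hk
                  obtain ⟨hc, hk2⟩ := hk
                  have := reflect5 t (by simpa [List.isPrefixOf_iff_prefix] using hk2)
                  apply h5
                  subst hc
                  simp [List.isPrefixOf]
                  exact List.isPrefixOf_iff_prefix.mp this
                · rw [rep_cons_mismatch _ _ _ _ (Bool.eq_false_iff.mpr hk)]
                  exact congrArg (c :: ·) (ih t (by simp at hl; omega))

theorem chain_eq (cs : List Char) (h : ¬ (['t','e','r','t','u','m'] : List Char) <:+: cs) :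
    rep ['t','u','j','h','e'] ['a','a','p','k','o']
      (rep ['t','e','r','e'] ['a','a','p','k','e']
        (rep ['t','e','r','a'] ['a','a','p','k','a']
          (rep ['T','u','m'] ['A','a','p']
            (rep ['t','u','m'] ['a','a','p'] cs)))) = scanT pvTable cs := by
  rw [step1aux cs.length cs le_rfl,
      step2aux cs.length cs le_rfl,
      step3aux cs.length cs le_rfl h,
      step4aux cs.length cs le_rfl,
      step5aux cs.length cs le_rfl]

theorem rep_head_src (old new : List Char) (hnew : new.head? = some 'a')
    (y : List Char) (c : Char) (x : List Char) (hc : c ≠ 'a')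
    (h : rep old new y = c :: x) : ∃ y', y = c :: y' ∧ rep old new y' = x := by
  match y with
  | [] => simp [rep] at h
  | c0 :: t0 =>
    rw [rep] at h
    split_ifs at h with hp
    · exfalso
      obtain ⟨vs, hvs⟩ := head?_shape _ _ hnew
      rw [hvs] at h
      simp at h
      exact hc h.1.symm
    · simp at h
      exact ⟨t0, by rw [h.1], h.2⟩

theorem reflect4P (t : List Char)
    (h : (['e','r','e'] : List Char).isPrefixOf
      (rep ['t','e','r','a'] ['a','a','p','k','a'] (scanT pvT2 t)) = true) :
    (['e','r','e'] : List Char).isPrefixOf t = true := by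
  obtain ⟨r, hr⟩ := List.isPrefixOf_iff_prefix.mp h
  obtain ⟨y1, hy1, hz1⟩ := rep_head_src _ _ rfl _ 'e' ('r'::'e'::r) (by decide) hr.symm
  obtain ⟨t1, ht1, hw1⟩ := scanT_head_src pvT2 hv2 t 'e' y1 (by decide) (by decide) hy1
  rw [← hw1] at hz1
  obtain ⟨y2, hy2, hz2⟩ := rep_head_src _ _ rfl _ 'r' ('e'::r) (by decide) hz1
  obtain ⟨t2, ht2, hw2⟩ := scanT_head_src pvT2 hv2 t1 'r' y2 (by decide) (by decide) hy2
  rw [← hw2] at hz2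
  obtain ⟨y3, hy3, hz3⟩ := rep_head_src _ _ rfl _ 'e' r (by decide) hz2
  obtain ⟨t3, ht3, hw3⟩ := scanT_head_src pvT2 hv2 t2 'e' y3 (by decide) (by decide) hy3
  subst ht1; subst ht2; subst ht3
  simp [List.isPrefixOf]

theorem reflect5P (t : List Char)
    (h : (['u','j','h','e'] : List Char).isPrefixOf
      (rep ['t','e','r','e'] ['a','a','p','k','e']
        (rep ['t','e','r','a'] ['a','a','p','k','a'] (scanT pvT2 t))) = true) :
    (['u','j','h','e'] : List Char).isPrefixOf t = true := by
  obtain ⟨r, hr⟩ := List.isPrefixOf_iff_prefix.mp h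
  obtain ⟨z1, hzz1, hq1⟩ := rep_head_src _ _ rfl _ 'u' ('j'::'h'::'e'::r) (by decide) hr.symm
  obtain ⟨y1, hy1, hz1⟩ := rep_head_src _ _ rfl _ 'u' z1 (by decide) hzz1
  obtain ⟨t1, ht1, hw1⟩ := scanT_head_src pvT2 hv2 t 'u' y1 (by decide) (by decide) hy1
  rw [← hw1] at hz1; rw [← hz1] at hq1
  obtain ⟨z2, hzz2, hq2⟩ := rep_head_src _ _ rfl _ 'j' ('h'::'e'::r) (by decide) hq1
  obtain ⟨y2, hy2, hz2⟩ := rep_head_src _ _ rfl _ 'j' z2 (by decide) hzz2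
  obtain ⟨t2, ht2, hw2⟩ := scanT_head_src pvT2 hv2 t1 'j' y2 (by decide) (by decide) hy2
  rw [← hw2] at hz2; rw [← hz2] at hq2
  obtain ⟨z3, hzz3, hq3⟩ := rep_head_src _ _ rfl _ 'h' ('e'::r) (by decide) hq2
  obtain ⟨y3, hy3, hz3⟩ := rep_head_src _ _ rfl _ 'h' z3 (by decide) hzz3
  obtain ⟨t3, ht3, hw3⟩ := scanT_head_src pvT2 hv2 t2 'h' y3 (by decide) (by decide) hy3
  rw [← hw3] at hz3; rw [← hz3] at hq3
  obtain ⟨z4, hzz4, hq4⟩ := rep_head_src _ _ rfl _ 'e' r (by decide) hq3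
  obtain ⟨y4, hy4, hz4⟩ := rep_head_src _ _ rfl _ 'e' z4 (by decide) hzz4
  obtain ⟨t4, ht4, hw4⟩ := scanT_head_src pvT2 hv2 t3 'e' y4 (by decide) (by decide) hy4
  subst ht1; subst ht2; subst ht3; subst ht4
  simp [List.isPrefixOf]

theorem lenF : ∀ (n : Nat) (cs : List Char), cs.length ≤ n →
    (rep ['t','u','j','h','e'] ['a','a','p','k','o']
      (rep ['t','e','r','e'] ['a','a','p','k','e']
        (rep ['t','e','r','a'] ['a','a','p','k','a'] (scanT pvT2 cs)))).length ≥
    (scanT pvTable cs).length +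
      (if (['t','e','r','t','u','m'] : List Char) <:+: cs then 1 else 0) := by
  intro n
  induction n with
  | zero =>
    intro cs hl
    have : cs = [] := List.eq_nil_of_length_eq_zero (Nat.le_zero.mp hl)
    subst this
    simp [scanT, rep]
  | succ n ih =>
    intro cs hl
    by_cases h1 : (['t','u','m'] : List Char).isPrefixOf cs = true
    · obtain ⟨r, hr⟩ := List.isPrefixOf_iff_prefix.mp h1
      subst hr
      simp only [List.cons_append, List.nil_append] at hl ⊢
      have hiff : ((['t','e','r','t','u','m'] : List Char) <:+: ('t'::'u'::'m'::r)) ↔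
          ((['t','e','r','t','u','m'] : List Char) <:+: r) := by
        constructor
        · intro hx
          rcases List.infix_cons_iff.mp hx with hp | hx
          · exfalso; obtain ⟨s2, hs2⟩ := hp; simp at hs2
          rcases List.infix_cons_iff.mp hx with hp | hx
          · exfalso; obtain ⟨s2, hs2⟩ := hp; simp at hs2
          rcases List.infix_cons_iff.mp hx with hp | hx
          · exfalso; obtain ⟨s2, hs2⟩ := hp; simp at hs2
          exact hx
        · intro hx
          exact hx.trans (List.IsSuffix.isInfix ⟨['t','u','m'], rfl⟩)
      have hIH := ih r (by simp at hl; omega)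
      simp [pvT2, pvTable] at hIH
      simp [scanT, rep, pvT2, pvTable, List.find?, List.isPrefixOf, hiff]
      split_ifs at hIH ⊢ <;> omega
    · by_cases h2 : (['T','u','m'] : List Char).isPrefixOf cs = true
      · obtain ⟨r, hr⟩ := List.isPrefixOf_iff_prefix.mp h2
        subst hr
        simp only [List.cons_append, List.nil_append] at hl ⊢
        have hiff : ((['t','e','r','t','u','m'] : List Char) <:+: ('T'::'u'::'m'::r)) ↔
            ((['t','e','r','t','u','m'] : List Char) <:+: r) := by
          constructor
          · intro hx
            rcases List.infix_cons_iff.mp hx with hp | hx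
            · exfalso; obtain ⟨s2, hs2⟩ := hp; simp at hs2
            rcases List.infix_cons_iff.mp hx with hp | hx
            · exfalso; obtain ⟨s2, hs2⟩ := hp; simp at hs2
            rcases List.infix_cons_iff.mp hx with hp | hx
            · exfalso; obtain ⟨s2, hs2⟩ := hp; simp at hs2
            exact hx
          · intro hx
            exact hx.trans (List.IsSuffix.isInfix ⟨['T','u','m'], rfl⟩)
        have hIH := ih r (by simp at hl; omega)
        simp [pvT2, pvTable] at hIH
        simp [scanT, rep, pvT2, pvTable, List.find?, List.isPrefixOf, hiff]
        split_ifs at hIH ⊢ <;> omega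
      · by_cases h3 : (['t','e','r','a'] : List Char).isPrefixOf cs = true
        · obtain ⟨r, hr⟩ := List.isPrefixOf_iff_prefix.mp h3
          subst hr
          simp only [List.cons_append, List.nil_append] at hl ⊢
          have hiff : ((['t','e','r','t','u','m'] : List Char) <:+: ('t'::'e'::'r'::'a'::r)) ↔
              ((['t','e','r','t','u','m'] : List Char) <:+: r) := by
            constructor
            · intro hx
              rcases List.infix_cons_iff.mp hx with hp | hx
              · exfalso; obtain ⟨s2, hs2⟩ := hp; simp at hs2
              rcases List.infix_cons_iff.mp hx with hp | hx
              · exfalso; obtain ⟨s2, hs2⟩ := hp; simp at hs2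
              rcases List.infix_cons_iff.mp hx with hp | hx
              · exfalso; obtain ⟨s2, hs2⟩ := hp; simp at hs2
              rcases List.infix_cons_iff.mp hx with hp | hx
              · exfalso; obtain ⟨s2, hs2⟩ := hp; simp at hs2
              exact hx
            · intro hx
              exact hx.trans (List.IsSuffix.isInfix ⟨['t','e','r','a'], rfl⟩)
          have hIH := ih r (by simp at hl; omega)
          simp [pvT2, pvTable] at hIH
          simp [scanT, rep, pvT2, pvTable, List.find?, List.isPrefixOf, hiff]
          split_ifs at hIH ⊢ <;> omega
        · by_cases h4 : (['t','e','r','e'] : List Char).isPrefixOf cs = true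
          · obtain ⟨r, hr⟩ := List.isPrefixOf_iff_prefix.mp h4
            subst hr
            simp only [List.cons_append, List.nil_append] at hl ⊢
            have hiff : ((['t','e','r','t','u','m'] : List Char) <:+: ('t'::'e'::'r'::'e'::r)) ↔
                ((['t','e','r','t','u','m'] : List Char) <:+: r) := by
              constructor
              · intro hx
                rcases List.infix_cons_iff.mp hx with hp | hx
                · exfalso; obtain ⟨s2, hs2⟩ := hp; simp at hs2
                rcases List.infix_cons_iff.mp hx with hp | hx
                · exfalso; obtain ⟨s2, hs2⟩ := hp; simp at hs2
                rcases List.infix_cons_iff.mp hx with hp | hx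
                · exfalso; obtain ⟨s2, hs2⟩ := hp; simp at hs2
                rcases List.infix_cons_iff.mp hx with hp | hx
                · exfalso; obtain ⟨s2, hs2⟩ := hp; simp at hs2
                exact hx
              · intro hx
                exact hx.trans (List.IsSuffix.isInfix ⟨['t','e','r','e'], rfl⟩)
            have hIH := ih r (by simp at hl; omega)
            simp [pvT2, pvTable] at hIH
            simp [scanT, rep, pvT2, pvTable, List.find?, List.isPrefixOf, hiff]
            split_ifs at hIH ⊢ <;> omega
          · by_cases h5 : (['t','u','j','h','e'] : List Char).isPrefixOf cs = true
            · obtain ⟨r, hr⟩ := List.isPrefixOf_iff_prefix.mp h5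
              subst hr
              simp only [List.cons_append, List.nil_append] at hl ⊢
              have hiff : ((['t','e','r','t','u','m'] : List Char) <:+: ('t'::'u'::'j'::'h'::'e'::r)) ↔
                  ((['t','e','r','t','u','m'] : List Char) <:+: r) := by
                constructor
                · intro hx
                  rcases List.infix_cons_iff.mp hx with hp | hx
                  · exfalso; obtain ⟨s2, hs2⟩ := hp; simp at hs2
                  rcases List.infix_cons_iff.mp hx with hp | hx
                  · exfalso; obtain ⟨s2, hs2⟩ := hp; simp at hs2
                  rcases List.infix_cons_iff.mp hx with hp | hx
                  · exfalso; obtain ⟨s2, hs2⟩ := hp; simp at hs2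
                  rcases List.infix_cons_iff.mp hx with hp | hx
                  · exfalso; obtain ⟨s2, hs2⟩ := hp; simp at hs2
                  rcases List.infix_cons_iff.mp hx with hp | hx
                  · exfalso; obtain ⟨s2, hs2⟩ := hp; simp at hs2
                  exact hx
                · intro hx
                  exact hx.trans (List.IsSuffix.isInfix ⟨['t','u','j','h','e'], rfl⟩)
              have hIH := ih r (by simp at hl; omega)
              simp [pvT2, pvTable] at hIH
              simp [scanT, rep, pvT2, pvTable, List.find?, List.isPrefixOf, hiff]
              split_ifs at hIH ⊢ <;> omega
            · rcases cs with _ | ⟨c, t⟩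
              · simp [scanT, rep]
              · have hs2 : scanT pvT2 (c :: t) = c :: scanT pvT2 t := by
                  rw [scanT]; simp [pvT2, List.find?, h1, h2]
                have hsB : scanT pvTable (c :: t) = c :: scanT pvTable t := by
                  rw [scanT]; simp [pvTable, List.find?, h1, h2, h3, h4, h5]
                by_cases hk3 : (['t','e','r','a'] : List Char).isPrefixOf (c :: scanT pvT2 t) = true
                · simp [List.isPrefixOf] at hk3
                  obtain ⟨hc, hk2⟩ := hk3
                  rcases reflect3 t (by simpa [List.isPrefixOf_iff_prefix] using hk2) with hera | hertum
                  · exfalso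
                    apply h3
                    subst hc
                    simp [List.isPrefixOf]
                    exact List.isPrefixOf_iff_prefix.mp hera
                  · obtain ⟨s, hsx⟩ := List.isPrefixOf_iff_prefix.mp hertum
                    subst hc
                    have hts : t = 'e'::'r'::'t'::'u'::'m'::s := by
                      rw [← hsx]; simp
                    subst hts
                    have hin : (['t','e','r','t','u','m'] : List Char) <:+:
                        ('t'::'e'::'r'::'t'::'u'::'m'::s) := ⟨[], s, rfl⟩
                    rw [if_pos hin]
                    have hIH := ih s (by simp at hl; omega)
                    simp [pvT2, pvTable] at hIH
                    simp [scanT, rep, pvT2, pvTable, List.find?, List.isPrefixOf]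
                    split_ifs at hIH <;> omega
                · rw [hs2, hsB, rep_cons_mismatch _ _ _ _ (Bool.eq_false_iff.mpr hk3)]
                  by_cases hk4 : (['t','e','r','e'] : List Char).isPrefixOf
                      (c :: rep ['t','e','r','a'] ['a','a','p','k','a'] (scanT pvT2 t)) = true
                  · exfalso
                    simp [List.isPrefixOf] at hk4
                    obtain ⟨hc, hk2⟩ := hk4
                    have := reflect4P t (by simpa [List.isPrefixOf_iff_prefix] using hk2)
                    apply h4
                    subst hc
                    simp [List.isPrefixOf]
                    exact List.isPrefixOf_iff_prefix.mp this
                  · rw [rep_cons_mismatch _ _ _ _ (Bool.eq_false_iff.mpr hk4)]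
                    by_cases hk5 : (['t','u','j','h','e'] : List Char).isPrefixOf
                        (c :: rep ['t','e','r','e'] ['a','a','p','k','e']
                          (rep ['t','e','r','a'] ['a','a','p','k','a'] (scanT pvT2 t))) = true
                    · exfalso
                      simp [List.isPrefixOf] at hk5
                      obtain ⟨hc, hk2⟩ := hk5
                      have := reflect5P t (by simpa [List.isPrefixOf_iff_prefix] using hk2)
                      apply h5
                      subst hc
                      simp [List.isPrefixOf]
                      exact List.isPrefixOf_iff_prefix.mp this
                    · rw [rep_cons_mismatch _ _ _ _ (Bool.eq_false_iff.mpr hk5)]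
                      have hpre : ¬ (['t','e','r','t','u','m'] : List Char) <+: (c :: t) := by
                        rintro ⟨s2, hs2x⟩
                        simp at hs2x
                        obtain ⟨hc, ht⟩ := hs2x
                        apply hk3
                        subst hc
                        rw [← ht]
                        have : scanT pvT2 ('e'::'r'::'t'::'u'::'m'::s2) =
                            'e'::'r'::'a'::'a'::'p':: scanT pvT2 s2 := by
                          simp [scanT, pvT2, List.find?, List.isPrefixOf]
                        rw [this]
                        simp [List.isPrefixOf]
                      have hiff : ((['t','e','r','t','u','m'] : List Char) <:+: (c :: t)) ↔
                          ((['t','e','r','t','u','m'] : List Char) <:+: t) := by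
                        constructor
                        · intro hx
                          rcases List.infix_cons_iff.mp hx with hp | hx
                          · exact absurd hp hpre
                          · exact hx
                        · intro hx
                          exact hx.trans (List.IsSuffix.isInfix ⟨[c], rfl⟩)
                      simp only [hiff, List.length_cons]
                      have hIH := ih t (by simp at hl; omega)
                      split_ifs at hIH ⊢ <;> omega

-- ===== VERDICT (by name: the statement is the Claim_ definition above) =====
theorem force_respect_spec : Claim_unchanged_force_respect := by
  intro text _ hD
  show force_respect text = force_respect_alt text
  have hinf : ¬ (['t','e','r','t','u','m'] : List Char) <:+: text.toList := by
    intro hx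
    exact hD ((PySem.Str.isIn_iff_infix _ _).mpr hx)
  have hkey : (force_respect text).toList = (force_respect_alt text).toList := by
    have hA : (force_respect text).toList =
        PySem.Chars.replace
          (PySem.Chars.replace
            (PySem.Chars.replace
              (PySem.Chars.replace
                (PySem.Chars.replace text.toList "tum".toList "aap".toList)
                "Tum".toList "Aap".toList)
              "tera".toList "aapka".toList)
            "tere".toList "aapke".toList)
          "tujhe".toList "aapko".toList := by
      simp [force_respect, PySem.Str.toList_replace]
    have hB : (force_respect_alt text).toList = scanT pvTable text.toList := by
      simp [force_respect_alt, String.toList_ofList]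
    rw [hA, hB,
        replace_eq_rep _ _ _ (by simp),
        replace_eq_rep _ _ _ (by simp),
        replace_eq_rep _ _ _ (by simp),
        replace_eq_rep _ _ _ (by simp),
        replace_eq_rep _ _ _ (by simp)]
    exact chain_eq text.toList hinf
  have := congrArg String.ofList hkey
  simpa [String.ofList_toList] using this

theorem force_respect_changed : Claim_changed_force_respect := by
  unfold Claim_changed_force_respect
  refine ⟨by decide, by decide, by decide, ?_, by decide⟩
  show force_respect_alt "tertum" = "teraap"
  have h : scanT pvTable ('t'::'e'::'r'::'t'::'u'::'m'::[]) = "teraap".toList := by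
    simp [scanT, pvTable, List.find?, List.isPrefixOf]
  calc force_respect_alt "tertum"
      = String.ofList (scanT pvTable ('t'::'e'::'r'::'t'::'u'::'m'::[])) := rfl
    _ = String.ofList ("teraap".toList) := by rw [h]
    _ = "teraap" := String.ofList_toList

theorem force_respect_tight : Claim_exact_force_respect := by
  intro text _ hD heq
  have hD' : PySem.Str.isIn "tertum" text = true := hD
  have hinf : (['t','e','r','t','u','m'] : List Char) <:+: text.toList := by
    simpa using (PySem.Str.isIn_iff_infix "tertum" text).mp hD'
  have hA : (force_respect text).toList =
      rep ['t','u','j','h','e'] ['a','a','p','k','o']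
        (rep ['t','e','r','e'] ['a','a','p','k','e']
          (rep ['t','e','r','a'] ['a','a','p','k','a'] (scanT pvT2 text.toList))) := by
    have h0 : (force_respect text).toList =
        PySem.Chars.replace (PySem.Chars.replace (PySem.Chars.replace (PySem.Chars.replace
          (PySem.Chars.replace text.toList "tum".toList "aap".toList)
          "Tum".toList "Aap".toList) "tera".toList "aapka".toList)
          "tere".toList "aapke".toList) "tujhe".toList "aapko".toList := by
      simp [force_respect, PySem.Str.toList_replace]
    rw [h0, replace_eq_rep _ _ _ (by simp), replace_eq_rep _ _ _ (by simp),
        replace_eq_rep _ _ _ (by simp), replace_eq_rep _ _ _ (by simp),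
        replace_eq_rep _ _ _ (by simp)]
    simp only [show ("tum".toList : List Char) = ['t','u','m'] from rfl,
      show ("aap".toList : List Char) = ['a','a','p'] from rfl,
      show ("Tum".toList : List Char) = ['T','u','m'] from rfl,
      show ("Aap".toList : List Char) = ['A','a','p'] from rfl,
      show ("tera".toList : List Char) = ['t','e','r','a'] from rfl,
      show ("aapka".toList : List Char) = ['a','a','p','k','a'] from rfl,
      show ("tere".toList : List Char) = ['t','e','r','e'] from rfl,
      show ("aapke".toList : List Char) = ['a','a','p','k','e'] from rfl,
      show ("tujhe".toList : List Char) = ['t','u','j','h','e'] from rfl,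
      show ("aapko".toList : List Char) = ['a','a','p','k','o'] from rfl]
    rw [step1aux text.toList.length text.toList le_rfl,
        step2aux text.toList.length text.toList le_rfl]
  have hB : (force_respect_alt text).toList = scanT pvTable text.toList := by
    simp [force_respect_alt, String.toList_ofList]
  have hlen := lenF text.toList.length text.toList le_rfl
  rw [if_pos hinf] at hlen
  have hEq : (force_respect text).toList = (force_respect_alt text).toList := by rw [heq]
  rw [hA, hB] at hEq
  have hL := congrArg List.length hEq
  simp only [hL] at hlen
  omega
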